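-- pv_equiv track=rewrite | github.com/NDevTK/infra | appengine/findit/handlers/code_coverage/serve_ci_coverage.py | _GetNameToPathSeparator
-- ===== SOURCE A (Python) =====
-- def _GetPathRootAndSeparatorFromDataType(data_type):
--   """Returns the path of the root and path separator for the given data type."""
--   if data_type in ('files', 'dirs'):
--     return '//', '/'
--   elif data_type == 'components':
--     return '>>', '>'
--   return None, None
--
-- def _GetNameToPathSeparator(path, data_type):
--   """Returns a list of [name, sub_path] for the given path.
--
--   Example:
--   1. //root/src/file.cc  -> [
--        ['root/', '//root/'],
--        ['src/', '//root/src/'],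
--        ['file.cc', '//root/src/file.cc']
--      ]
--   2. //root/src/path1/ -> [
--        ['root/', '//root/'],
--        ['src/', '//root/src/'],
--        ['path1/', '//root/src/path1/']
--      ]
--   3. component1>component2  -> [
--        ['component1', 'component1'],
--        ['component2', 'component1>component2'],
--      ]
--   """
--   path_parts = []
--   if not path:
--     return path_parts
--
--   path_root, path_separator = _GetPathRootAndSeparatorFromDataType(data_type)
--   if path == path_root:
--     return path_parts
--
--   if data_type == 'components':
--     index = 0
--   else:
--     index = 2  # Skip the leading '//' in the path.
--
--   while index >= 0:
--     next_index = path.find(path_separator, index)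
--     if next_index >= 0:
--       name = path[index:next_index + 1]
--       if data_type == 'components':
--         sub_path = path[:next_index]
--       else:
--         sub_path = path[:next_index + 1]
--       next_index += 1
--     else:
--       name = path[index:]
--       sub_path = path
--     path_parts.append([name, sub_path])
--     index = next_index
--
--   return path_parts
-- ===== SOURCE B (Python) =====
-- def _GetPathRootAndSeparatorFromDataType(data_type):
--   """Returns the path of the root and path separator for the given data type."""
--   if data_type in ('files', 'dirs'):
--     return '//', '/'
--   elif data_type == 'components':
--     return '>>', '>'
--   return None, None
--
--
-- def _GetNameToPathSeparator(path, data_type):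
--   """Single left-to-right pass over the characters instead of repeated find().
--
--   Walks path[start:] once, accumulating the current segment name; each time the
--   separator character is seen it emits [name + sep, cumulative sub_path] and
--   resets the accumulator; the final segment is emitted with the full path.
--   """
--   if not path:
--     return []
--
--   path_root, path_separator = _GetPathRootAndSeparatorFromDataType(data_type)
--   if path == path_root:
--     return []
--
--   start = 0 if data_type == 'components' else len(path_root)  # skip the leading '//'
--   parts = []
--   name = ''
--   seen = start  # number of characters of path consumed so far
--   for ch in path[start:]:
--     seen += 1
--     if ch == path_separator:
--       sub = path[:seen - 1] if data_type == 'components' else path[:seen]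
--       parts.append([name + path_separator, sub])
--       name = ''
--     else:
--       name += ch
--   parts.append([name, path])
--   return parts
-- ===== Notes on version B (the rewrite author's own statement) =====
-- stated objective: alternative
-- what changed: Replaces A's while-loop of repeated path.find(separator, index) calls and index slicing with a single left-to-right pass over the characters of path[start:], accumulating the current segment name and the count of consumed characters.
import Mathlib
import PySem

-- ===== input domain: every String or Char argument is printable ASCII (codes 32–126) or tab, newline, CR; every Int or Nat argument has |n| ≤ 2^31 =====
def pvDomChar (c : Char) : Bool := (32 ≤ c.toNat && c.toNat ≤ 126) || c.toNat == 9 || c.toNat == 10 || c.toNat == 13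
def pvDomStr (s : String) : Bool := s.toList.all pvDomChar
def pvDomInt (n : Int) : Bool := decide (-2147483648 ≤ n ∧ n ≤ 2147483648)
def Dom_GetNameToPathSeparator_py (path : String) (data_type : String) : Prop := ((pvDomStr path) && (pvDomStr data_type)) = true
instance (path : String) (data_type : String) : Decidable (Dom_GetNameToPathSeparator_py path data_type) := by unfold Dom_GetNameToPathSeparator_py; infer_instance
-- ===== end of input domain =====

-- B replaces A's repeated `path.find(separator, index)` scan with a single
-- left-to-right pass over the characters of `path[start:]`, accumulating the
-- current segment name (objective: alternative single-pass decomposition).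

-- ===== PORT A =====
-- helper `_GetPathRootAndSeparatorFromDataType` (shared by the two Pythons)
def rootSepOfDataType (data_type : String) : Option String × Option String :=
  if data_type = "files" ∨ data_type = "dirs" then (some "//", some "/")
  else if data_type = "components" then (some ">>", some ">")
  else (none, none)

theorem findFrom_gt_len (s sub : List Char) (i : Nat) (h : s.length < i) :
    PySem.Chars.findFrom s sub (i : Int) none = -1 := by
  simp only [PySem.Chars.findFrom]
  have h1 : ¬ ((i:Int) < 0) := by omega
  have h2 : ((s.length : Int)) < (i:Int) := by exact_mod_cast h
  simp [h1, h2]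

-- totality guard for A's while loop: a found separator lies in [index, length)
theorem findFrom_pos_bounds (path sep : String) (index : Nat) (hsep : sep ≠ "")
    (h : 0 ≤ PySem.Str.findFrom path sep (index : Int) none) :
    (index : Int) ≤ PySem.Str.findFrom path sep (index : Int) none ∧
    (PySem.Str.findFrom path sep (index : Int) none).toNat < path.toList.length := by
  rw [PySem.Str.findFrom_eq] at h ⊢
  have hsub : sep.toList ≠ [] := by
    intro hnil
    exact hsep (String.toList_inj.mp (by simp [hnil]))
  by_cases hi : index ≤ path.toList.length
  · rw [PySem.Chars.findFrom_natCast _ _ index hi] at h ⊢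
    by_cases hf : PySem.Chars.find (path.toList.drop index) sep.toList = -1
    · simp [hf] at h
    · have h0 : 0 ≤ PySem.Chars.find (path.toList.drop index) sep.toList := by
        have := PySem.Chars.neg_one_le_find (path.toList.drop index) sep.toList
        omega
      obtain ⟨h1, _⟩ := PySem.Chars.find_spec h0
      have hlen := h1.length_le
      have hpos : 0 < sep.toList.length := List.length_pos_of_ne_nil hsub
      simp only [List.length_drop] at hlen
      have hpos' := List.length_pos_of_ne_nil hsub
      rw [if_neg hf]
      constructor
      · omega
      · omega
  · rw [findFrom_gt_len _ _ index (by omega)] at h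
    omega

-- the `while index >= 0` loop of A, as structural recursion (the `else` branch
-- appends its entry and sets index = -1, i.e. terminates the loop)
def aLoop (path data_type sep : String) (hsep : sep ≠ "") (index : Nat) :
    List (List String) :=
  let next := PySem.Str.findFrom path sep (index : Int) none
  if h : 0 ≤ next then
    let name := PySem.Str.slice path (some (index : Int)) (some (next + 1))
    let sub := if data_type = "components" then PySem.Str.slice path none (some next)
               else PySem.Str.slice path none (some (next + 1))
    [name, sub] :: aLoop path data_type sep hsep (next.toNat + 1)
  else
    [[PySem.Str.slice path (some (index : Int)) none, path]]
termination_by path.toList.length + 1 - index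
decreasing_by
  have hb := findFrom_pos_bounds path sep index hsep h
  omega

-- separator returned by the helper is never the empty string
theorem rootSep_sep_ne (data_type sep : String)
    (h : (rootSepOfDataType data_type).2 = some sep) : sep ≠ "" := by
  unfold rootSepOfDataType at h
  split_ifs at h <;> simp_all <;> simp [← h]

def GetNameToPathSeparator_py (path : String) (data_type : String) : List (List String) :=
  if path = "" then []
  else
    let rs := rootSepOfDataType data_type
    if rs.1 = some path then []
    else
      match hm : rs.2 with
      | none => []   -- Python raises TypeError here (path.find(None, index)); excluded by Pre_
      | some sep =>
        aLoop path data_type sep (rootSep_sep_ne data_type sep hm)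
          (if data_type = "components" then 0 else 2)

-- ===== PORT B =====
-- B's `for ch in path[start:]` loop; `name`/`seen` are the accumulators, the
-- emitted strings are built with String.ofList over char lists (str concat by hand)
def bLoop (path : String) (sep? : Option String) (data_type : String)
    (name : List Char) (seen : Nat) : List Char → List (List String)
  | [] => [[String.ofList name, path]]
  | ch :: rest =>
    if sep? = some (String.ofList [ch]) then
      -- Python: seen += 1 first, then path[:seen-1] / path[:seen]
      let sub := if data_type = "components" then PySem.Str.slice path none (some (seen : Int))
                 else PySem.Str.slice path none (some ((seen + 1 : Nat) : Int))
      -- name + path_separator, and path_separator == ch in this branch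
      [String.ofList (name ++ [ch]), sub] :: bLoop path sep? data_type [] (seen + 1) rest
    else
      bLoop path sep? data_type (name ++ [ch]) (seen + 1) rest

def GetNameToPathSeparator_py_alt (path : String) (data_type : String) : List (List String) :=
  if path = "" then []
  else
    let rs := rootSepOfDataType data_type
    if rs.1 = some path then []
    else
      match rs.1 with
      | none => []   -- Python raises TypeError here (len(None)); excluded by Pre_
      | some root =>
        let start : Nat := if data_type = "components" then 0 else (PySem.Str.len root).toNat
        bLoop path rs.2 data_type [] start
          (PySem.Str.slice path (some (start : Int)) none).toList

-- ===== PRECONDITION & SPEC =====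
-- Pre_ excludes exactly the inputs on which A raises TypeError: a non-empty path
-- with a data_type that has no separator (path.find(None, index)).
def Pre_GetNameToPathSeparator_py (path : String) (data_type : String) : Prop :=
  path = "" ∨ data_type = "files" ∨ data_type = "dirs" ∨ data_type = "components"
instance (path : String) (data_type : String) : Decidable (Pre_GetNameToPathSeparator_py path data_type) := by unfold Pre_GetNameToPathSeparator_py; infer_instance

def pvWitness_GetNameToPathSeparator_py : String × String := ("//root/src/file.cc", "files")

def Spec_GetNameToPathSeparator_py (path : String) (data_type : String) (out : List (List String)) : Prop := out = GetNameToPathSeparator_py_alt path data_type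
instance (path : String) (data_type : String) (out : List (List String)) : Decidable (Spec_GetNameToPathSeparator_py path data_type out) := by unfold Spec_GetNameToPathSeparator_py; infer_instance

-- ===== CLAIM (what is proved, stated in full; the proofs are below) =====
def Claim_equal_GetNameToPathSeparator_py : Prop := ∀ (path : String) (data_type : String), Dom_GetNameToPathSeparator_py path data_type → Pre_GetNameToPathSeparator_py path data_type → Spec_GetNameToPathSeparator_py path data_type (GetNameToPathSeparator_py path data_type)

-- ===== LEMMAS AND PROOFS =====

-- [c] is a prefix of l.drop j exactly when l[j] = c
theorem singleton_prefix_iff_head (t : List Char) (c : Char) :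
    [c] <+: t ↔ t.head? = some c := by
  cases t <;> simp [List.cons_prefix_cons, eq_comm]

theorem singleton_prefix_iff (l : List Char) (c : Char) (j : Nat) :
    [c] <+: l.drop j ↔ l[j]? = some c := by
  rw [singleton_prefix_iff_head, List.head?_drop]

-- find of a single character whose first occurrence is at position k
theorem find_single_first (l : List Char) (c : Char) (k : Nat)
    (hc : l[k]? = some c) (hbefore : ∀ j < k, l[j]? ≠ some c) :
    PySem.Chars.find l [c] = (k : Int) := by

  have hmem : c ∈ l := List.mem_of_getElem? hc
  have h0 : 0 ≤ PySem.Chars.find l [c] :=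
    (PySem.Chars.find_nonneg_iff l [c]).mpr ((List.singleton_infix_iff c l).mpr hmem)
  obtain ⟨h1, h2⟩ := PySem.Chars.find_spec h0
  have hlm : l[(PySem.Chars.find l [c]).toNat]? = some c := (singleton_prefix_iff l c _).mp h1
  have : (PySem.Chars.find l [c]).toNat = k := by
    rcases Nat.lt_trichotomy (PySem.Chars.find l [c]).toNat k with h | h | h
    · exact absurd hlm (hbefore _ h)
    · exact h
    · exact absurd ((singleton_prefix_iff l c k).mpr hc) (h2 k h)
  omega


theorem find_single_not_mem' (l : List Char) (c : Char) (h : c ∉ l) :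
    PySem.Chars.find l [c] = -1 :=
  (PySem.Chars.find_eq_neg_one_iff l [c]).mpr (fun hin => h ((List.singleton_infix_iff c l).mp hin))

theorem findFrom_no_sep (s : List Char) (c : Char) (i : Nat)
    (h : ∀ j, i ≤ j → s[j]? ≠ some c) :
    PySem.Chars.findFrom s [c] (i : Int) none = -1 := by
  by_cases hi : i ≤ s.length
  · rw [PySem.Chars.findFrom_natCast s [c] i hi]
    have : c ∉ s.drop i := by
      intro hmem
      obtain ⟨j, hj, hv⟩ := List.getElem_of_mem hmem
      exact h (i + j) (by omega) (by rw [← List.getElem?_drop, List.getElem?_eq_getElem hj, hv])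
    simp [find_single_not_mem' _ _ this]
  · exact findFrom_gt_len s [c] i (by omega)

theorem findFrom_first (s : List Char) (c : Char) (i k : Nat) (hik : i ≤ k)
    (hc : s[k]? = some c) (hbefore : ∀ j, i ≤ j → j < k → s[j]? ≠ some c) :
    PySem.Chars.findFrom s [c] (i : Int) none = (k : Int) := by
  have hklen : k < s.length := by
    by_contra hk
    simp [List.getElem?_eq_none (by omega : s.length ≤ k)] at hc
  have hi : i ≤ s.length := by omega
  rw [PySem.Chars.findFrom_natCast s [c] i hi]
  have hfind : PySem.Chars.find (s.drop i) [c] = ((k - i : Nat) : Int) := by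
    apply find_single_first
    · rw [List.getElem?_drop]; rw [show i + (k - i) = k by omega]; exact hc
    · intro j hj
      rw [List.getElem?_drop]
      exact hbefore (i + j) (by omega) (by omega)
  rw [hfind]
  have : ¬ (((k - i : Nat) : Int) = -1) := by omega
  simp [this]
  omega

-- core loop equivalence: A's find loop at index i equals B's char walk
theorem loop_eq (path sep data_type : String) (hsep : sep ≠ "") (c : Char)
    (hc : sep.toList = [c]) :
    ∀ (rest : List Char) (i seen : Nat) (name : List Char),
      rest = path.toList.drop seen →
      i ≤ seen →
      name = (path.toList.drop i).take (seen - i) →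
      (∀ j, i ≤ j → j < seen → path.toList[j]? ≠ some c) →
      aLoop path data_type sep hsep i = bLoop path (some sep) data_type name seen rest := by
  intro rest
  induction rest with
  | nil =>
    intro i seen name hrest hile hname hno
    have hlt : path.toList.length = path.length := by simp
    have hlen : path.toList.length ≤ seen := by
      have := congrArg List.length hrest
      simp at this
      omega
    have hff : PySem.Str.findFrom path sep (i : Int) none = -1 := by
      rw [PySem.Str.findFrom_eq, hc]
      refine findFrom_no_sep _ c i (fun j hj hje => ?_)
      by_cases hjs : j < seen
      · exact hno j hj hjs hje
      · rw [List.getElem?_eq_none (by omega : path.toList.length ≤ j)] at hje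
        simp at hje
    rw [aLoop, bLoop]
    simp only [hff]
    rw [dif_neg (by omega)]
    have hslice : PySem.Str.slice path (some (i : Int)) none = String.ofList name := by
      apply String.toList_inj.mp
      rw [hname, String.toList_ofList, PySem.Str.toList_slice, PySem.Chars.slice_eq_listSlice,
        PySem.List.slice_from_natCast]
      rw [List.take_of_length_le (by simp only [List.length_drop]; omega)]
    rw [hslice]
  | cons ch rest ih =>
    intro i seen name hrest hile hname hno
    have hseen : seen < path.toList.length := by
      by_contra hle
      rw [List.drop_eq_nil_of_le (by omega)] at hrest
      simp at hrest
    have hch : path.toList[seen]? = some ch := by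
      rw [← List.head?_drop, ← hrest]
      rfl
    have hrest' : rest = path.toList.drop (seen + 1) := by
      have : path.toList.drop (seen + 1) = (path.toList.drop seen).drop 1 := by
        rw [List.drop_drop]
      rw [this, ← hrest]
      rfl
    by_cases hcc : ch = c
    · subst hcc
      have hsepeq : (some sep : Option String) = some (String.ofList [ch]) := by
        congr 1
        exact String.toList_inj.mp (by simp [hc])
      have hff : PySem.Str.findFrom path sep (i : Int) none = (seen : Int) := by
        rw [PySem.Str.findFrom_eq, hc]
        exact findFrom_first _ ch i seen hile hch hno
      rw [aLoop, bLoop]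
      simp only [hff, Int.toNat_natCast]
      rw [if_pos hsepeq, dif_pos (by omega : (0:Int) ≤ (seen : Int))]
      have hname' : PySem.Str.slice path (some (i : Int)) (some ((seen : Int) + 1)) =
          String.ofList (name ++ [ch]) := by
        apply String.toList_inj.mp
        rw [String.toList_ofList, PySem.Str.toList_slice, PySem.Chars.slice_eq_listSlice]
        rw [show ((seen : Int) + 1) = ((seen + 1 : Nat) : Int) by push_cast; ring]
        rw [PySem.List.slice_natCast]
        rw [show seen + 1 - i = (seen - i) + 1 by omega, List.take_add_one]
        rw [hname, List.getElem?_drop, show i + (seen - i) = seen by omega, hch]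
        rfl
      rw [hname']
      rw [ih (seen + 1) (seen + 1) [] hrest' le_rfl (by simp) (by omega)]
      norm_cast
    · rw [bLoop]
      rw [if_neg (by
        intro hEq
        apply hcc
        have : sep = String.ofList [ch] := Option.some.inj hEq
        have := congrArg String.toList this
        rw [hc, String.toList_ofList] at this
        exact (List.cons.inj this).1.symm)]
      refine ih i (seen + 1) (name ++ [ch]) hrest' (by omega) ?_ ?_
      · rw [show seen + 1 - i = (seen - i) + 1 by omega, List.take_add_one]
        rw [hname, List.getElem?_drop, show i + (seen - i) = seen by omega, hch]
        rfl
      · intro j h1 h2 hje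
        by_cases hjs : j < seen
        · exact hno j h1 hjs hje
        · have : j = seen := by omega
          subst this
          rw [hch] at hje
          exact hcc (Option.some.inj hje)

-- ===== VERDICT (by name: the statement is the Claim_ definition above) =====
-- one data_type with a known (root, separator): both top levels reduce, then loop_eq
theorem main_case (path data_type root sep : String) (hsep : sep ≠ "") (c : Char)
    (hc : sep.toList = [c])
    (hroot : rootSepOfDataType data_type = (some root, some sep))
    (hlen : (PySem.Str.len root).toNat = 2) (hp : path ≠ "") :
    GetNameToPathSeparator_py path data_type = GetNameToPathSeparator_py_alt path data_type := by
  unfold GetNameToPathSeparator_py GetNameToPathSeparator_py_alt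
  rw [if_neg hp, if_neg hp]
  simp only [hroot]
  by_cases hr : (some root : Option String) = some path
  · rw [if_pos hr, if_pos hr]
  · rw [if_neg hr, if_neg hr]
    have h2 : (rootSepOfDataType data_type).2 = some sep := by rw [hroot]
    split
    next hm => rw [h2] at hm; simp at hm
    next s hm =>
    rw [h2] at hm
    obtain rfl : sep = s := Option.some.inj hm
    rw [hlen]
    refine loop_eq path sep data_type hsep c hc _ _ _ [] ?_ le_rfl (by simp) (by omega)
    rw [PySem.Str.toList_slice, PySem.Chars.slice_eq_listSlice]
    split
    · exact (PySem.List.slice_from_natCast path.toList 0).symm ▸ rfl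
    · exact (PySem.List.slice_from_natCast path.toList 2).symm ▸ rfl

theorem GetNameToPathSeparator_py_spec : Claim_equal_GetNameToPathSeparator_py := by
  intro path data_type _ hpre
  unfold Spec_GetNameToPathSeparator_py
  by_cases hp : path = ""
  · simp [GetNameToPathSeparator_py, GetNameToPathSeparator_py_alt, hp]
  · rcases hpre with h | h | h | h
    · exact absurd h hp
    · exact main_case path data_type "//" "/" (by decide) '/' rfl (by rw [h]; decide) (by decide) hp
    · exact main_case path data_type "//" "/" (by decide) '/' rfl (by rw [h]; decide) (by decide) hp
    · exact main_case path data_type ">>" ">" (by decide) '>' rfl (by rw [h]; decide) (by decide) hp
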